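-- pv_equiv track=rewrite | github.com/JelixLi/Genetic-AntColonyAlgorithm | GeneticAlgorithm/tspTests.py | check_opt
-- ===== SOURCE A (Python) =====
-- def check_opt(nodes,length):
--     if len(nodes)!=length:
--         return False
--     check_dict = {}
--     for n in nodes:
--         if check_dict.get(n):
--             return False
--         check_dict[n] = True
--     return True
-- ===== SOURCE B (Python) =====
-- def check_opt(nodes, length):
--     if len(nodes) != length:
--         return False
--     s = sorted(nodes)
--     return all(a != b for a, b in zip(s, s[1:]))
-- ===== Notes on version B (the rewrite author's own statement) =====
-- stated objective: alternative
-- what changed: Replaces A's hash-based single pass (seen-dict with early return) by sort-then-scan: sort the nodes and verify every adjacent pair differs, which detects duplicates by ordering instead of membership lookup.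
import Mathlib
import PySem

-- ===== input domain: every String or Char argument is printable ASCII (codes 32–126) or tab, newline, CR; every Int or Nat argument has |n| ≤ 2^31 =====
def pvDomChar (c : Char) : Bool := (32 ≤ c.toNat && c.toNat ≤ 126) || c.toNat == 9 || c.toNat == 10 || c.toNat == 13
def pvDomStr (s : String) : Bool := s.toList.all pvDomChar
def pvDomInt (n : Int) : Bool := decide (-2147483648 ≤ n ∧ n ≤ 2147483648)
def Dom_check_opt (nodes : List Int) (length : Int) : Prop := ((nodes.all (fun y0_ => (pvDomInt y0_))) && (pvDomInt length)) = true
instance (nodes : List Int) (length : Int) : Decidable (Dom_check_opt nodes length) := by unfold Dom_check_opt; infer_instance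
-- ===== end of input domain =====

-- B replaces A's hash-based seen-dict pass by sort-then-scan: sort the nodes and
-- check every adjacent pair differs (objective: alternative algorithm, same result).

-- ===== PORT A =====
-- the 'for n in nodes' loop: early 'return False' on a seen node, else record it
def checkOptLoop (d : PySem.Dict Int Bool) : List Int → Bool
  | [] => true
  | n :: ns => if d.getD n false then false else checkOptLoop (d.insert n true) ns

def check_opt (nodes : List Int) (length : Int) : Bool :=
  if (nodes.length : Int) ≠ length then false
  else checkOptLoop PySem.Dict.empty nodes

-- ===== PORT B =====
def check_opt_alt (nodes : List Int) (length : Int) : Bool :=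
  if (nodes.length : Int) ≠ length then false
  else
    let s := PySem.List.sorted nodes (fun x => x) false
    -- all(a != b for a, b in zip(s, s[1:]))
    (s.zip (PySem.List.slice s (some 1) none)).all (fun p => p.1 != p.2)

-- ===== PRECONDITION & SPEC =====
def Spec_check_opt (nodes : List Int) (length : Int) (out : Bool) : Prop := out = check_opt_alt nodes length
instance (nodes : List Int) (length : Int) (out : Bool) : Decidable (Spec_check_opt nodes length out) := by unfold Spec_check_opt; infer_instance

-- ===== CLAIM (what is proved, stated in full; the proofs are below) =====
def Claim_equal_check_opt : Prop := ∀ (nodes : List Int) (length : Int), Dom_check_opt nodes length → Spec_check_opt nodes length (check_opt nodes length)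

-- ===== LEMMAS AND PROOFS =====

-- A's loop returns true iff the remaining nodes are distinct and none was seen before
theorem checkOptLoop_eq_nodup (ns : List Int) : ∀ (d : PySem.Dict Int Bool),
    (checkOptLoop d ns = true) ↔ (ns.Nodup ∧ ∀ x ∈ ns, d.getD x false = false) := by
  induction ns with
  | nil => intro d; simp [checkOptLoop]
  | cons n ns ih =>
    intro d
    by_cases h : d.getD n false
    · simp only [checkOptLoop, h, if_true]
      constructor
      · intro hfalse; cases hfalse
      · rintro ⟨-, hall⟩
        have := hall n (by simp)
        rw [h] at this; cases this
    · simp only [checkOptLoop, h, Bool.false_eq_true, if_false]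
      rw [ih]
      have hins : ∀ x, (d.insert n true).getD x false = if x = n then true else d.getD x false := by
        intro x; rw [PySem.Dict.getD_insert]
      constructor
      · rintro ⟨hnd, hall⟩
        have hnin : n ∉ ns := by
          intro hmem
          have := hall n hmem
          rw [hins n] at this; simp at this
        refine ⟨List.nodup_cons.mpr ⟨hnin, hnd⟩, ?_⟩
        intro x hx
        rcases List.mem_cons.mp hx with rfl | hx'
        · simpa using h
        · have := hall x hx'
          rw [hins x] at this
          by_cases hxn : x = n
          · subst hxn; exact absurd hx' hnin
          · simpa [hxn] using this
      · rintro ⟨hnd, hall⟩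
        obtain ⟨hnin, hnd'⟩ := List.nodup_cons.mp hnd
        refine ⟨hnd', ?_⟩
        intro x hx
        rw [hins x]
        have hxn : x ≠ n := fun he => hnin (he ▸ hx)
        simpa [hxn] using hall x (List.mem_cons_of_mem n hx)

-- adjacent-distinct on a ≤-sorted list is exactly Nodup
theorem zip_tail_all_ne_iff_nodup : ∀ (s : List Int), s.Pairwise (· ≤ ·) →
    ((s.zip (s.drop 1)).all (fun p => p.1 != p.2) = true ↔ s.Nodup) := by
  intro s
  induction s with
  | nil => intro _; simp
  | cons a t ih =>
    intro hp
    cases t with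
    | nil => simp
    | cons b u =>
      obtain ⟨hle, hp'⟩ := List.pairwise_cons.mp hp
      have ihr := ih hp'
      simp only [List.drop_one, List.tail_cons, List.zip_cons_cons, List.all_cons,
        Bool.and_eq_true, bne_iff_ne, ne_eq] at ihr ⊢
      constructor
      · rintro ⟨hab, hrest⟩
        have hnd : (b :: u).Nodup := ihr.mp hrest
        have hab' : a < b := lt_of_le_of_ne (hle b (by simp)) hab
        refine List.nodup_cons.mpr ⟨?_, hnd⟩
        intro hmem
        rcases List.mem_cons.mp hmem with rfl | hmem'
        · exact absurd rfl hab
        · -- a ∈ u, but b ≤ every element of u and a < b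
          have hbu : b ≤ a := (List.pairwise_cons.mp hp').1 a hmem'
          exact absurd (lt_of_lt_of_le hab' hbu) (lt_irrefl a)
      · intro hnd
        obtain ⟨hnin, hnd'⟩ := List.nodup_cons.mp hnd
        exact ⟨fun he => hnin (he ▸ List.mem_cons_self), ihr.mpr hnd'⟩

theorem slice_one_eq_drop (s : List Int) : PySem.List.slice s (some 1) none = s.drop 1 := by
  simpa using PySem.List.slice_from_one s

-- ===== VERDICT (by name: the statement is the Claim_ definition above) =====
theorem check_opt_spec : Claim_equal_check_opt := by
  intro nodes length _
  unfold Spec_check_opt check_opt check_opt_alt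
  by_cases hlen : (nodes.length : Int) = length
  · simp only [hlen, ne_eq, not_true_eq_false, if_false]
    have hsortp : (PySem.List.sorted nodes (fun x => x) false).Pairwise (· ≤ ·) := by
      simpa using PySem.List.sorted_pairwise (xs := nodes) (key := fun x => x)
    have hperm : (PySem.List.sorted nodes (fun x => x) false).Perm nodes :=
      PySem.List.sorted_perm ..
    rw [slice_one_eq_drop]
    have hA : checkOptLoop PySem.Dict.empty nodes = true ↔ nodes.Nodup := by
      rw [checkOptLoop_eq_nodup]
      simp [PySem.Dict.empty, PySem.Dict.getD, PySem.Dict.get?]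
    have hB := zip_tail_all_ne_iff_nodup _ hsortp
    rw [hperm.nodup_iff] at hB
    rw [← hA] at hB
    by_cases hv : checkOptLoop PySem.Dict.empty nodes = true
    · rw [hv, (hB.mpr hv)]
    · have h1 : checkOptLoop PySem.Dict.empty nodes = false := by
        revert hv; cases checkOptLoop PySem.Dict.empty nodes <;> simp
      have h2 : ((PySem.List.sorted nodes (fun x => x) false).zip
          ((PySem.List.sorted nodes (fun x => x) false).drop 1)).all (fun p => p.1 != p.2) = false := by
        have : ¬ _ := fun h => hv (hB.mp h)
        revert this
        cases ((PySem.List.sorted nodes (fun x => x) false).zip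
          ((PySem.List.sorted nodes (fun x => x) false).drop 1)).all (fun p => p.1 != p.2) <;> simp
      rw [h1, h2]
  · simp [hlen]
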